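-- pv_equiv track=rewrite | github.com/jbrunclik/aoc2024 | day4.py | check_mas_cross
-- ===== SOURCE A (Python) =====
-- def check_mas_cross(surroundings):
--     patterns = [
--         [["M", None, "S"], [None, "A", None], ["M", None, "S"]],
--         [["S", None, "M"], [None, "A", None], ["S", None, "M"]],
--         [["M", None, "M"], [None, "A", None], ["S", None, "S"]],
--         [["S", None, "S"], [None, "A", None], ["M", None, "M"]],
--         [["S", None, "S"], [None, "A", None], ["M", None, "M"]],
--         [["M", None, "S"], [None, "A", None], ["M", None, "S"]],
--         [["S", None, "M"], [None, "A", None], ["S", None, "M"]],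
--     ]
--
--     def matches_pattern(surroundings, pattern):
--         for y in range(3):
--             for x in range(3):
--                 if pattern[y][x] is not None and surroundings[y][x] != pattern[y][x]:
--                     return False
--         return True
--
--     return any(matches_pattern(surroundings, pattern) for pattern in patterns)
-- ===== SOURCE B (Python) =====
-- def check_mas_cross(surroundings):
--     def cell(y, x):
--         if y < len(surroundings):
--             row = surroundings[y]
--             if x < len(row):
--                 return row[x]
--         return None
--     return (
--         cell(1, 1) == "A"
--         and {cell(0, 0), cell(2, 2)} == {"M", "S"}
--         and {cell(0, 2), cell(2, 0)} == {"M", "S"}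
--     )
-- ===== Notes on version B (the rewrite author's own statement) =====
-- stated objective: simpler
-- what changed: B drops the 7-pattern x 9-cell table scan and checks one boolean condition directly: the center cell is 'A' and each diagonal's corner pair is exactly the set {'M','S'}, with out-of-bounds cells read as absent (None).
import Mathlib
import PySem

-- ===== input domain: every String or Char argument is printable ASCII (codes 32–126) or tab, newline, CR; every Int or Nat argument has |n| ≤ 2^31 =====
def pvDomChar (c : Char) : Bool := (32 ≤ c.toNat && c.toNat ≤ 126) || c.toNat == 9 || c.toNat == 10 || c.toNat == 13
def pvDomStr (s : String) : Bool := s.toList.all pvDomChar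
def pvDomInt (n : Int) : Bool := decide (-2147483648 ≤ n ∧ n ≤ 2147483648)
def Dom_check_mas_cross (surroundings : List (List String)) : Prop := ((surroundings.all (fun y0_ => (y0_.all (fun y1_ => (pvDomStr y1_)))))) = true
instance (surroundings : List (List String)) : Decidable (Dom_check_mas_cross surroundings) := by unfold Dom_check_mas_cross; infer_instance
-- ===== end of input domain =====

-- B replaces A's 7-pattern × 9-cell table scan by one direct boolean condition
-- (center "A", each diagonal's corner pair equal to the set {"M","S"}, out-of-bounds
-- neighbours read as absent); objective: simpler.

-- ===== PORT A =====
-- the patterns table; Python None -> Option.none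
def pvPatterns : List (List (List (Option String))) :=
  [ [[some "M", none, some "S"], [none, some "A", none], [some "M", none, some "S"]],
    [[some "S", none, some "M"], [none, some "A", none], [some "S", none, some "M"]],
    [[some "M", none, some "M"], [none, some "A", none], [some "S", none, some "S"]],
    [[some "S", none, some "S"], [none, some "A", none], [some "M", none, some "M"]],
    [[some "S", none, some "S"], [none, some "A", none], [some "M", none, some "M"]],
    [[some "M", none, some "S"], [none, some "A", none], [some "M", none, some "S"]],
    [[some "S", none, some "M"], [none, some "A", none], [some "S", none, some "M"]] ]

-- surroundings[y][x]; totalised with getD "" — inside Pre_ a "" default is read only at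
-- cells where every pattern mismatches anyway (Python A returns False there, never a value
-- depending on the default; where the default would matter Python A raises, outside Pre_)
def pvCell (s : List (List String)) (y x : Int) : String :=
  (PySem.List.pyGet? ((PySem.List.pyGet? s y).getD []) x).getD ""

-- pattern[y][x] (always in range: the table is a literal 3x3)
def pvPCell (p : List (List (Option String))) (y x : Int) : Option String :=
  (PySem.List.pyGet? ((PySem.List.pyGet? p y).getD []) x).getD none

-- for y in range(3): for x in range(3): if pattern[y][x] is not None and s[y][x] != pattern[y][x]: return False; return True
def pvMatchesPattern (s : List (List String)) (p : List (List (Option String))) : Bool :=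
  (PySem.List.pyRange 0 3 1).all (fun y =>
    (PySem.List.pyRange 0 3 1).all (fun x =>
      match pvPCell p y x with
      | none => true
      | some v => pvCell s y x == v))

def check_mas_cross (surroundings : List (List String)) : Bool :=
  pvPatterns.any (fun p => pvMatchesPattern surroundings p)

-- ===== PORT B =====
-- def cell(y, x): if y < len(surroundings): row = surroundings[y]; if x < len(row): return row[x]; return None
def pvCellOpt (s : List (List String)) (y x : Int) : Option String :=
  if y < (s.length : Int) then
    let row := (PySem.List.pyGet? s y).getD []
    if x < (row.length : Int) then PySem.List.pyGet? row x else none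
  else none

-- cell(1,1) == "A" and {cell(0,0), cell(2,2)} == {"M","S"} and {cell(0,2), cell(2,0)} == {"M","S"}
def check_mas_cross_alt (surroundings : List (List String)) : Bool :=
  pvCellOpt surroundings 1 1 == some "A"
    && PySem.Set.equal (PySem.Set.ofList [pvCellOpt surroundings 0 0, pvCellOpt surroundings 2 2])
         (PySem.Set.ofList [some "M", some "S"])
    && PySem.Set.equal (PySem.Set.ofList [pvCellOpt surroundings 0 2, pvCellOpt surroundings 2 0])
         (PySem.Set.ofList [some "M", some "S"])

-- ===== PRECONDITION & SPEC =====
-- input-shape helpers for Pre_ (independent of both ports)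
def pvRow (s : List (List String)) (y : Nat) : List String := (s[y]?).getD []
def pvVal (s : List (List String)) (y x : Nat) : String := ((pvRow s y)[x]?).getD ""
-- the five cells A's scan reads, in scan order, and the index of the first absent one
def pvFirstMissing (s : List (List String)) : Nat :=
  if ¬ (0 < s.length ∧ 0 < (pvRow s 0).length) then 0
  else if ¬ (0 < s.length ∧ 2 < (pvRow s 0).length) then 1
  else if ¬ (1 < s.length ∧ 1 < (pvRow s 1).length) then 2
  else if ¬ (2 < s.length ∧ 0 < (pvRow s 2).length) then 3
  else if ¬ (2 < s.length ∧ 2 < (pvRow s 2).length) then 4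
  else 5
def pvVals (s : List (List String)) : List String :=
  [pvVal s 0 0, pvVal s 0 2, pvVal s 1 1, pvVal s 2 0, pvVal s 2 2]
-- the four distinct letter assignments of A's seven patterns to those five cells
def pvCombos : List (List String) :=
  [["M","S","A","M","S"], ["S","M","A","S","M"], ["M","M","A","S","S"], ["S","S","A","M","M"]]
-- Pre_ holds exactly where Python A returns (no IndexError): a full 3x3 neighbourhood, or a
-- malformed grid on which every pattern mismatches at a cell read before the first absent cell.
def Pre_check_mas_cross (surroundings : List (List String)) : Prop :=
  (3 ≤ surroundings.length ∧ 3 ≤ (pvRow surroundings 0).length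
    ∧ 2 ≤ (pvRow surroundings 1).length ∧ 3 ≤ (pvRow surroundings 2).length)
  ∨ (∀ L ∈ pvCombos, ∃ i < pvFirstMissing surroundings, (pvVals surroundings)[i]? ≠ L[i]?)
instance (surroundings : List (List String)) : Decidable (Pre_check_mas_cross surroundings) := by
  unfold Pre_check_mas_cross; infer_instance

def pvWitness_check_mas_cross : List (List String) :=
  [["M", "x", "S"], ["x", "A", "x"], ["M", "x", "S"]]

def Spec_check_mas_cross (surroundings : List (List String)) (out : Bool) : Prop := out = check_mas_cross_alt surroundings
instance (surroundings : List (List String)) (out : Bool) : Decidable (Spec_check_mas_cross surroundings out) := by unfold Spec_check_mas_cross; infer_instance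

-- ===== CLAIM (what is proved, stated in full; the proofs are below) =====
def Claim_equal_check_mas_cross : Prop := ∀ (surroundings : List (List String)), Dom_check_mas_cross surroundings → Pre_check_mas_cross surroundings → Spec_check_mas_cross surroundings (check_mas_cross surroundings)

-- ===== LEMMAS AND PROOFS =====

-- Python's {x, y} == {"M", "S"} as a boolean formula in the two elements
lemma pv_pair (x y : Option String) :
    PySem.Set.equal (PySem.Set.ofList [x, y]) (PySem.Set.ofList [some "M", some "S"])
      = ((x == some "M" && y == some "S") || (x == some "S" && y == some "M")) := by
  cases hE : PySem.Set.equal (PySem.Set.ofList [x, y]) (PySem.Set.ofList [some "M", some "S"]) with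
  | true =>
    have h := (PySem.Set.equal_iff _ _).mp hE
    have hx := (h x).mp (by simp [PySem.Set.mem_ofList])
    have hy := (h y).mp (by simp [PySem.Set.mem_ofList])
    have hM := (h (some "M")).mpr (by simp [PySem.Set.mem_ofList])
    have hS := (h (some "S")).mpr (by simp [PySem.Set.mem_ofList])
    simp [PySem.Set.mem_ofList] at hx hy hM hS
    rcases hx with hx | hx <;> rcases hy with hy | hy <;> simp_all
  | false =>
    cases hR : ((x == some "M" && y == some "S") || (x == some "S" && y == some "M"))
    · rfl
    · simp only [Bool.or_eq_true, Bool.and_eq_true, beq_iff_eq] at hR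
      rcases hR with ⟨hx, hy⟩ | ⟨hx, hy⟩ <;> subst hx <;> subst hy <;>
        exact absurd hE (by decide)

lemma pv_some_beq (u v : String) : (some u == some v) = (u == v) := rfl

-- one pattern's conjunct over the five cells A reads
def pvM (s : List (List String)) (l00 l02 l20 l22 : String) : Bool :=
  (pvCell s 0 0 == l00) && ((pvCell s 0 2 == l02) && ((pvCell s 1 1 == "A")
    && ((pvCell s 2 0 == l20) && (pvCell s 2 2 == l22))))

lemma pvMatches_eq (s : List (List String)) (l00 l02 l20 l22 : String) :
    pvMatchesPattern s [[some l00, none, some l02], [none, some "A", none], [some l20, none, some l22]]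
      = pvM s l00 l02 l20 l22 := by
  have hr : PySem.List.pyRange 0 3 1 = [0, 1, 2] := by decide
  simp only [pvMatchesPattern, hr, List.all_cons, List.all_nil, pvPCell, pysem, pvM]
  simp [Bool.and_assoc]

-- A's port as the disjunction of its seven pattern conjuncts
lemma pvA_eq (s : List (List String)) :
    check_mas_cross s =
      (pvM s "M" "S" "M" "S" || (pvM s "S" "M" "S" "M" || (pvM s "M" "M" "S" "S"
        || (pvM s "S" "S" "M" "M" || (pvM s "S" "S" "M" "M" || (pvM s "M" "S" "M" "S"
        || pvM s "S" "M" "S" "M")))))) := by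
  simp only [check_mas_cross, pvPatterns, List.any_cons, List.any_nil, pvMatches_eq, Bool.or_false]

set_option maxHeartbeats 1000000 in
-- on a full 3x3 neighbourhood the two ports agree (a boolean tautology over the ten
-- letter-equality atoms of the five read cells)
theorem pv_key (a0 a1 a2 b0 b1 c0 c1 c2 : String)
    (ta tb tc : List String) (t : List (List String)) :
    check_mas_cross ((a0::a1::a2::ta)::(b0::b1::tb)::(c0::c1::c2::tc)::t)
      = check_mas_cross_alt ((a0::a1::a2::ta)::(b0::b1::tb)::(c0::c1::c2::tc)::t) := by
  have e00 : pvCellOpt ((a0::a1::a2::ta)::(b0::b1::tb)::(c0::c1::c2::tc)::t) 0 0 = some a0 := by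
    simp [pvCellOpt, pysem]; try omega
  have e02 : pvCellOpt ((a0::a1::a2::ta)::(b0::b1::tb)::(c0::c1::c2::tc)::t) 0 2 = some a2 := by
    simp [pvCellOpt, pysem]; try omega
  have e11 : pvCellOpt ((a0::a1::a2::ta)::(b0::b1::tb)::(c0::c1::c2::tc)::t) 1 1 = some b1 := by
    simp [pvCellOpt, pysem]; try omega
  have e20 : pvCellOpt ((a0::a1::a2::ta)::(b0::b1::tb)::(c0::c1::c2::tc)::t) 2 0 = some c0 := by
    simp [pvCellOpt, pysem]; try omega
  have e22 : pvCellOpt ((a0::a1::a2::ta)::(b0::b1::tb)::(c0::c1::c2::tc)::t) 2 2 = some c2 := by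
    simp [pvCellOpt, pysem]; try omega
  have v00 : pvCell ((a0::a1::a2::ta)::(b0::b1::tb)::(c0::c1::c2::tc)::t) 0 0 = a0 := by
    simp [pvCell, pysem]
  have v02 : pvCell ((a0::a1::a2::ta)::(b0::b1::tb)::(c0::c1::c2::tc)::t) 0 2 = a2 := by
    simp [pvCell, pysem]
  have v11 : pvCell ((a0::a1::a2::ta)::(b0::b1::tb)::(c0::c1::c2::tc)::t) 1 1 = b1 := by
    simp [pvCell, pysem]
  have v20 : pvCell ((a0::a1::a2::ta)::(b0::b1::tb)::(c0::c1::c2::tc)::t) 2 0 = c0 := by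
    simp [pvCell, pysem]
  have v22 : pvCell ((a0::a1::a2::ta)::(b0::b1::tb)::(c0::c1::c2::tc)::t) 2 2 = c2 := by
    simp [pvCell, pysem]
  rw [pvA_eq, check_mas_cross_alt, pv_pair, pv_pair, e00, e02, e11, e20, e22]
  simp only [pvM, v00, v02, v11, v20, v22, pv_some_beq]
  generalize (a0 == "M") = pa
  generalize (a0 == "S") = qa
  generalize (a2 == "M") = pb
  generalize (a2 == "S") = qb
  generalize (b1 == "A") = pc
  generalize (c0 == "M") = pd
  generalize (c0 == "S") = qd
  generalize (c2 == "M") = pe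
  generalize (c2 == "S") = qe
  revert pa qa pb qb pc pd qd pe qe
  decide

-- when one of the five read cells is absent, A's totalised port fails every pattern and
-- B's port reads None there: both ports return false
lemma pv_miss_len (s : List (List String)) (h : s.length < 3) :
    check_mas_cross s = check_mas_cross_alt s := by
  have hnone : s[2]? = (none : Option (List String)) := List.getElem?_eq_none (by omega)
  have hc : pvCell s 2 0 = "" := by simp [pvCell, pysem, hnone]
  have ho : pvCellOpt s 2 0 = none := by
    simp only [pvCellOpt, pysem]
    split_ifs <;> first | rfl | (exfalso; omega)
  have hA : check_mas_cross s = false := by rw [pvA_eq]; simp [pvM, hc]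
  have hB : check_mas_cross_alt s = false := by
    rw [check_mas_cross_alt, pv_pair, pv_pair, ho]; simp
  rw [hA, hB]

lemma pv_miss_r0 (s : List (List String)) (h : (pvRow s 0).length < 3) :
    check_mas_cross s = check_mas_cross_alt s := by
  simp only [pvRow] at h
  have hnone : (s[0]?.getD [])[2]? = (none : Option String) := List.getElem?_eq_none (by omega)
  have hc : pvCell s 0 2 = "" := by simp [pvCell, pysem, hnone]
  have ho : pvCellOpt s 0 2 = none := by
    simp only [pvCellOpt, pysem]
    split_ifs <;> first | rfl | (exfalso; omega)
  have hA : check_mas_cross s = false := by rw [pvA_eq]; simp [pvM, hc]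
  have hB : check_mas_cross_alt s = false := by
    rw [check_mas_cross_alt, pv_pair, pv_pair, ho]; simp
  rw [hA, hB]

lemma pv_miss_r1 (s : List (List String)) (h : (pvRow s 1).length < 2) :
    check_mas_cross s = check_mas_cross_alt s := by
  simp only [pvRow] at h
  have hnone : (s[1]?.getD [])[1]? = (none : Option String) := List.getElem?_eq_none (by omega)
  have hc : pvCell s 1 1 = "" := by simp [pvCell, pysem, hnone]
  have ho : pvCellOpt s 1 1 = none := by
    simp only [pvCellOpt, pysem]
    split_ifs <;> first | rfl | (exfalso; omega)
  have hA : check_mas_cross s = false := by rw [pvA_eq]; simp [pvM, hc]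
  have hB : check_mas_cross_alt s = false := by rw [check_mas_cross_alt, ho]; simp
  rw [hA, hB]

lemma pv_miss_r2 (s : List (List String)) (h : (pvRow s 2).length < 3) :
    check_mas_cross s = check_mas_cross_alt s := by
  simp only [pvRow] at h
  have hnone : (s[2]?.getD [])[2]? = (none : Option String) := List.getElem?_eq_none (by omega)
  have hc : pvCell s 2 2 = "" := by simp [pvCell, pysem, hnone]
  have ho : pvCellOpt s 2 2 = none := by
    simp only [pvCellOpt, pysem]
    split_ifs <;> first | rfl | (exfalso; omega)
  have hA : check_mas_cross s = false := by rw [pvA_eq]; simp [pvM, hc]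
  have hB : check_mas_cross_alt s = false := by
    rw [check_mas_cross_alt, pv_pair, pv_pair, ho]; simp
  rw [hA, hB]

-- ===== VERDICT (by name: the statement is the Claim_ definition above) =====
theorem check_mas_cross_spec : Claim_equal_check_mas_cross := by
  intro s _ _
  unfold Spec_check_mas_cross
  rcases Nat.lt_or_ge s.length 3 with hL | hL
  · exact pv_miss_len s hL
  rcases Nat.lt_or_ge (pvRow s 0).length 3 with h0 | h0
  · exact pv_miss_r0 s h0
  rcases Nat.lt_or_ge (pvRow s 1).length 2 with h1 | h1
  · exact pv_miss_r1 s h1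
  rcases Nat.lt_or_ge (pvRow s 2).length 3 with h2 | h2
  · exact pv_miss_r2 s h2
  match s, hL, h0, h1, h2 with
  | r0 :: r1 :: r2 :: t, _, h0, h1, h2 =>
    simp only [pvRow, List.getElem?_cons_zero, List.getElem?_cons_succ, Option.getD_some] at h0 h1 h2
    match r0, h0, r1, h1, r2, h2 with
    | a0 :: a1 :: a2 :: ta, _, b0 :: b1 :: tb, _, c0 :: c1 :: c2 :: tc, _ =>
      exact pv_key a0 a1 a2 b0 b1 c0 c1 c2 ta tb tc t
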